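-- pv_equiv track=rewrite | github.com/dunshigaoren111/- | ParseXml.py | split_sen
-- ===== SOURCE A (Python) =====
-- def split_sen(string):
--     spl_sen=''
--     for i in range(len(string)):
--         if(string[i]!=' 'and string[i]!='\n' and i!=len(string)-1):
--             spl_sen+=string[i]+' '
--         else:
--             spl_sen += string[i]
--     return spl_sen
-- ===== SOURCE B (Python) =====
-- def split_sen(string):
--     # Staged whole-string passes instead of a per-character loop:
--     # 1) put a sentinel (NUL, never present in the text domain) between every pair of adjacent chars,
--     # 2) delete the sentinels that follow ' ' or '\n',
--     # 3) turn the remaining sentinels into spaces.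
--     t = '\x00'.join(string)
--     t = t.replace(' \x00', ' ').replace('\n\x00', '\n')
--     return t.replace('\x00', ' ')
-- ===== Notes on version B (the rewrite author's own statement) =====
-- stated objective: faster
-- what changed: Replaces the per-character index loop and guard with three whole-string passes: join with a sentinel character between every adjacent pair, two replace passes deleting the sentinel after space and after newline, and a final replace turning remaining sentinels into spaces.
import Mathlib
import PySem

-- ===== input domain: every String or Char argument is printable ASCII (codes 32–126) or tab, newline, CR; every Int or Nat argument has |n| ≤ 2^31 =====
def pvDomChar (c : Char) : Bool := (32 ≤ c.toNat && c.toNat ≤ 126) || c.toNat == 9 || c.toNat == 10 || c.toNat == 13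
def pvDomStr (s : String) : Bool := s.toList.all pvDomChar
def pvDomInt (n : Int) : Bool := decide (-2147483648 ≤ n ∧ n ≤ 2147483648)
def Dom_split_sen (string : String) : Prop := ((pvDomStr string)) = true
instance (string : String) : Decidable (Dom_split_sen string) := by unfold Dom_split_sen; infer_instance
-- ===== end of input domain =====

-- B replaces A's per-character index loop by three whole-string passes (sentinel join + replace passes); return values proved equal on the ASCII domain.


-- ===== PORT A =====
-- for i in range(len(string)): append string[i]+' ' when char not ' '/'\n' and i not last, else string[i]
def split_sen (string : String) : String :=
  let cs := string.toList
  let n := cs.length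
  String.mk ((List.range n).foldl (fun acc i =>
    let c := cs.getD i ' '          -- i < n always, so getD is exact for string[i]
    if c ≠ ' ' ∧ c ≠ '\n' ∧ i ≠ n - 1 then acc ++ [c, ' '] else acc ++ [c]) [])

-- ===== PORT B =====
-- t = '\x00'.join(string); t = t.replace(' \x00', ' ').replace('\n\x00', '\n'); return t.replace('\x00', ' ')
def split_sen_alt (string : String) : String :=
  let t := PySem.Str.join "\x00" (string.toList.map (fun c => String.mk [c]))
  let t2 := PySem.Str.replace (PySem.Str.replace t " \x00" " ") "\n\x00" "\n"
  PySem.Str.replace t2 "\x00" " "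

-- ===== PRECONDITION & SPEC =====
def Spec_split_sen (string : String) (out : String) : Prop := out = split_sen_alt string
instance (string : String) (out : String) : Decidable (Spec_split_sen string out) := by unfold Spec_split_sen; infer_instance

-- ===== CLAIM (what is proved, stated in full; the proofs are below) =====
def Claim_equal_split_sen : Prop := ∀ (string : String), Dom_split_sen string → Spec_split_sen string (split_sen string)

-- ===== LEMMAS AND PROOFS =====

theorem go_cons (old new : List Char) (fuel : Nat) (c : Char) (t acc : List Char) :
    PySem.Chars.replace.go old new (fuel+1) (c :: t) acc =
      if old.isPrefixOf (c :: t) = true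
      then PySem.Chars.replace.go old new fuel (List.drop old.length (c :: t)) (new.reverse ++ acc)
      else PySem.Chars.replace.go old new fuel t (c :: acc) := by
  rw [PySem.Chars.replace.go.eq_def]
theorem go_nil (old new acc : List Char) (fuel : Nat) :
    PySem.Chars.replace.go old new fuel [] acc = acc.reverse := by
  cases fuel with
  | zero => rw [PySem.Chars.replace.go.eq_def]; simp
  | succ f => rw [PySem.Chars.replace.go.eq_def]

theorem rep_nul : ∀ (l : List Char) (fuel : Nat), l.length ≤ fuel → ∀ (acc : List Char),
    PySem.Chars.replace.go ['\x00'] [' '] fuel l acc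
      = acc.reverse ++ l.map (fun c => if c = '\x00' then ' ' else c) := by
  intro l
  induction l with
  | nil => intro fuel _ acc; simp [go_nil]
  | cons c t ih =>
    intro fuel hf acc
    cases fuel with
    | zero => simp at hf
    | succ f =>
      rw [go_cons]
      by_cases hc : c = '\x00'
      · subst hc
        have hp : List.isPrefixOf ['\x00'] ('\x00' :: t) = true := by simp [List.isPrefixOf]
        rw [if_pos hp]
        have h2 := ih f (by simp at hf ⊢; omega) (' ' :: acc)
        simpa using h2
      · have hp : List.isPrefixOf ['\x00'] (c :: t) = false := by
          simp [List.isPrefixOf]; exact fun h => absurd h.symm hc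
        rw [hp]
        simp only [Bool.false_eq_true, if_false]
        have h2 := ih f (by simp at hf ⊢; omega) (c :: acc)
        simpa [hc] using h2

theorem rep_sp : ∀ (bs : List Char), (∀ c ∈ bs, c ≠ '\x00') →
    ∀ (tl : List Char), tl.length ≤ 1 → (∀ c ∈ tl, c ≠ '\x00') →
    ∀ (fuel : Nat), (bs.flatMap (fun c => [c, '\x00']) ++ tl).length ≤ fuel →
    ∀ (acc : List Char),
    PySem.Chars.replace.go [' ', '\x00'] [' '] fuel (bs.flatMap (fun c => [c, '\x00']) ++ tl) acc
      = acc.reverse ++ bs.flatMap (fun c => if c = ' ' then [c] else [c, '\x00']) ++ tl := by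
  intro bs
  induction bs with
  | nil =>
    intro _ tl htl hnul fuel hf acc
    match tl, htl with
    | [], _ => simp [go_nil]
    | [c], _ =>
      cases fuel with
      | zero => simp at hf
      | succ f =>
        simp only [List.flatMap_nil, List.nil_append]
        rw [go_cons]
        have hp : List.isPrefixOf [' ', '\x00'] [c] = false := by
          simp [List.isPrefixOf]
        rw [hp]
        simp [go_nil]
  | cons c bs ih =>
    intro hb tl htl hnul fuel hf acc
    have hcnul : c ≠ '\x00' := hb c (by simp)
    have hb' : ∀ x ∈ bs, x ≠ '\x00' := fun x hx => hb x (by simp [hx])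
    simp only [List.flatMap_cons, List.append_assoc, List.cons_append, List.nil_append] at hf ⊢
    obtain ⟨f, rfl⟩ : ∃ f, fuel = f + 2 := by
      simp at hf; exact ⟨fuel - 2, by omega⟩
    by_cases hcsp : c = ' '
    · subst hcsp
      rw [go_cons]
      have hp : List.isPrefixOf [' ', '\x00'] (' ' :: '\x00' :: (bs.flatMap (fun c => [c, '\x00']) ++ tl)) = true := by
        simp [List.isPrefixOf]
      rw [if_pos hp]
      have h2 := ih hb' tl htl hnul (f+1) (by simp at hf ⊢; omega) (' ' :: acc)
      simpa using h2
    · rw [go_cons]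
      have hp : List.isPrefixOf [' ', '\x00'] (c :: '\x00' :: (bs.flatMap (fun c => [c, '\x00']) ++ tl)) = false := by
        simp [List.isPrefixOf]; intro h; exact absurd h.symm hcsp
      rw [hp]
      simp only [Bool.false_eq_true, if_false]
      rw [go_cons]
      have hp2 : List.isPrefixOf [' ', '\x00'] ('\x00' :: (bs.flatMap (fun c => [c, '\x00']) ++ tl)) = false := by
        simp [List.isPrefixOf]
      rw [hp2]
      simp only [Bool.false_eq_true, if_false]
      have h2 := ih hb' tl htl hnul f (by simp at hf ⊢; omega) ('\x00' :: c :: acc)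
      simpa [hcsp] using h2

theorem rep_nl : ∀ (bs : List Char), (∀ c ∈ bs, c ≠ '\x00') →
    ∀ (tl : List Char), tl.length ≤ 1 → (∀ c ∈ tl, c ≠ '\x00') →
    ∀ (fuel : Nat), (bs.flatMap (fun c => if c = ' ' then [c] else [c, '\x00']) ++ tl).length ≤ fuel →
    ∀ (acc : List Char),
    PySem.Chars.replace.go ['\n', '\x00'] ['\n'] fuel
        (bs.flatMap (fun c => if c = ' ' then [c] else [c, '\x00']) ++ tl) acc
      = acc.reverse ++ bs.flatMap (fun c => if c = ' ' ∨ c = '\n' then [c] else [c, '\x00']) ++ tl := by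
  intro bs
  induction bs with
  | nil =>
    intro _ tl htl hnul fuel hf acc
    match tl, htl with
    | [], _ => simp [go_nil]
    | [c], _ =>
      cases fuel with
      | zero => simp at hf
      | succ f =>
        simp only [List.flatMap_nil, List.nil_append]
        rw [go_cons]
        have hp : List.isPrefixOf ['\n', '\x00'] [c] = false := by
          simp [List.isPrefixOf]
        rw [hp]
        simp [go_nil]
  | cons c bs ih =>
    intro hb tl htl hnul fuel hf acc
    have hcnul : c ≠ '\x00' := hb c (by simp)
    have hb' : ∀ x ∈ bs, x ≠ '\x00' := fun x hx => hb x (by simp [hx])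
    by_cases hcsp : c = ' '
    · subst hcsp
      simp only [List.flatMap_cons, eq_self_iff_true, if_true, true_or, List.append_assoc,
        List.cons_append, List.nil_append] at hf ⊢
      obtain ⟨f, rfl⟩ : ∃ f, fuel = f + 1 := by
        simp at hf; exact ⟨fuel - 1, by omega⟩
      rw [go_cons]
      have hp : List.isPrefixOf ['\n', '\x00']
          (' ' :: (bs.flatMap (fun c => if c = ' ' then [c] else [c, '\x00']) ++ tl)) = false := by
        simp [List.isPrefixOf]
      rw [hp]
      simp only [Bool.false_eq_true, if_false]
      have h2 := ih hb' tl htl hnul f (by simp at hf ⊢; omega) (' ' :: acc)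
      simpa using h2
    · simp only [List.flatMap_cons, if_neg hcsp, List.append_assoc, List.cons_append,
        List.nil_append] at hf ⊢
      obtain ⟨f, rfl⟩ : ∃ f, fuel = f + 2 := by
        simp at hf; exact ⟨fuel - 2, by omega⟩
      by_cases hcnl : c = '\n'
      · subst hcnl
        rw [go_cons]
        have hp : List.isPrefixOf ['\n', '\x00']
            ('\n' :: '\x00' :: (bs.flatMap (fun c => if c = ' ' then [c] else [c, '\x00']) ++ tl)) = true := by
          simp [List.isPrefixOf]
        rw [if_pos hp]
        have h2 := ih hb' tl htl hnul (f+1) (by simp at hf ⊢; omega) ('\n' :: acc)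
        simpa [hcsp] using h2
      · rw [go_cons]
        have hp : List.isPrefixOf ['\n', '\x00']
            (c :: '\x00' :: (bs.flatMap (fun c => if c = ' ' then [c] else [c, '\x00']) ++ tl)) = false := by
          simp [List.isPrefixOf]; intro h; exact absurd h.symm hcnl
        rw [hp]
        simp only [Bool.false_eq_true, if_false]
        rw [go_cons]
        have hp2 : List.isPrefixOf ['\n', '\x00']
            ('\x00' :: (bs.flatMap (fun c => if c = ' ' then [c] else [c, '\x00']) ++ tl)) = false := by
          simp [List.isPrefixOf]
        rw [hp2]
        simp only [Bool.false_eq_true, if_false]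
        have h2 := ih hb' tl htl hnul f (by simp at hf ⊢; omega) ('\x00' :: c :: acc)
        simpa [hcsp, hcnl] using h2

theorem join_blocks (cs : List Char) :
    PySem.Chars.join ['\x00'] (cs.map ([·]))
      = cs.dropLast.flatMap (fun c => [c, '\x00']) ++ cs.drop (cs.length - 1) := by
  induction cs with
  | nil => simp [PySem.Chars.join, List.intercalate]
  | cons a t ih =>
    cases t with
    | nil => simp [PySem.Chars.join, List.intercalate]
    | cons b t' =>
      simp only [PySem.Chars.join, List.map_cons] at ih ⊢
      rw [List.intercalate, List.intersperse_cons₂, List.flatten_cons, List.flatten_cons,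
        ← List.intercalate, ih]
      simp

theorem map_blocks (bs : List Char) (h : ∀ c ∈ bs, c ≠ '\x00') :
    (bs.flatMap (fun c => if c = ' ' ∨ c = '\n' then [c] else [c, '\x00'])).map
        (fun c => if c = '\x00' then ' ' else c)
      = bs.flatMap (fun c => if c ≠ ' ' ∧ c ≠ '\n' then [c, ' '] else [c]) := by
  induction bs with
  | nil => simp
  | cons c t ih =>
    have hc : c ≠ '\x00' := h c (by simp)
    have ht := ih (fun x hx => h x (by simp [hx]))
    by_cases h1 : c = ' ' ∨ c = '\n'
    · simp [h1, ht, hc]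
      rcases h1 with h1 | h1 <;> simp [h1]
    · push_neg at h1
      simp [h1.1, h1.2, ht, hc]

theorem final_assembly (s : String) (hnul : ∀ c ∈ s.toList, c ≠ '\x00') :
    PySem.Str.replace (PySem.Str.replace (PySem.Str.replace
        (PySem.Str.join "\x00" (s.toList.map (fun c => String.mk [c]))) " \x00" " ")
        "\n\x00" "\n") "\x00" " "
    = String.mk (s.toList.dropLast.flatMap (fun c => if c ≠ ' ' ∧ c ≠ '\n' then [c, ' '] else [c])
        ++ s.toList.drop (s.toList.length - 1)) := by
  set cs := s.toList with hcs
  have hbs : ∀ c ∈ cs.dropLast, c ≠ '\x00' := fun c hc => hnul c (List.dropLast_subset cs hc)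
  have htl : ∀ c ∈ cs.drop (cs.length - 1), c ≠ '\x00' :=
    fun c hc => hnul c (List.drop_subset (cs.length - 1) cs hc)
  have htll : (cs.drop (cs.length - 1)).length ≤ 1 := by
    simp [List.length_drop]; omega
  -- stage 1
  have h1 : (PySem.Str.join "\x00" (cs.map (fun c => String.mk [c]))).toList
      = cs.dropLast.flatMap (fun c => [c, '\x00']) ++ cs.drop (cs.length - 1) := by
    rw [PySem.Str.join]
    have : (cs.map (fun c => String.mk [c])).map String.toList = cs.map ([·]) := by
      simp only [List.map_map]
      exact List.map_congr_left (fun a _ => Eq.symm ((fun {l} {s} => String.ofList_eq.mp) rfl))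
    simp only [this]
    rw [show ("\x00".toList : List Char) = ['\x00'] from rfl, join_blocks]
    simp
  -- stage 2
  have h2 : (PySem.Str.replace (PySem.Str.join "\x00" (cs.map (fun c => String.mk [c]))) " \x00" " ").toList
      = cs.dropLast.flatMap (fun c => if c = ' ' then [c] else [c, '\x00']) ++ cs.drop (cs.length - 1) := by
    rw [PySem.Str.replace]
    rw [h1]
    rw [show (" \x00".toList : List Char) = [' ', '\x00'] from rfl,
        show (" ".toList : List Char) = [' '] from rfl]
    rw [show ∀ (l : List Char), PySem.Chars.replace l [' ', '\x00'] [' ']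
          = PySem.Chars.replace.go [' ', '\x00'] [' '] l.length l []
        from fun l => by simp [PySem.Chars.replace]]
    rw [rep_sp cs.dropLast hbs _ htll htl _ le_rfl []]
    simp
  -- stage 3
  have h3 : (PySem.Str.replace (PySem.Str.replace (PySem.Str.join "\x00" (cs.map (fun c => String.mk [c]))) " \x00" " ") "\n\x00" "\n").toList
      = cs.dropLast.flatMap (fun c => if c = ' ' ∨ c = '\n' then [c] else [c, '\x00']) ++ cs.drop (cs.length - 1) := by
    rw [PySem.Str.replace, h2]
    rw [show ("\n\x00".toList : List Char) = ['\n', '\x00'] from rfl,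
        show ("\n".toList : List Char) = ['\n'] from rfl]
    rw [show ∀ (l : List Char), PySem.Chars.replace l ['\n', '\x00'] ['\n']
          = PySem.Chars.replace.go ['\n', '\x00'] ['\n'] l.length l []
        from fun l => by simp [PySem.Chars.replace]]
    rw [rep_nl cs.dropLast hbs _ htll htl _ le_rfl []]
    simp
  -- stage 4
  rw [PySem.Str.replace, h3]
  rw [show ("\x00".toList : List Char) = ['\x00'] from rfl,
      show (" ".toList : List Char) = [' '] from rfl]
  rw [show ∀ (l : List Char), PySem.Chars.replace l ['\x00'] [' ']
        = PySem.Chars.replace.go ['\x00'] [' '] l.length l []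
      from fun l => by simp [PySem.Chars.replace]]
  rw [rep_nul _ _ le_rfl []]
  rw [List.map_append, map_blocks cs.dropLast hbs]
  rw [show (cs.drop (cs.length - 1)).map (fun c => if c = '\x00' then ' ' else c)
        = (cs.drop (cs.length - 1)).map id from
      List.map_congr_left (fun c hc => by simp [htl c hc]), List.map_id]
  rfl


-- folding over indices of xs, appending f of each element, is a flatMap
theorem idxfold (f : Char → List Char) :
    ∀ (xs : List Char) (a : List Char),
      (List.range xs.length).foldl (fun acc i => acc ++ f (xs.getD i ' ')) a
        = a ++ xs.flatMap f := by
  intro xs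
  induction xs with
  | nil => intro a; simp
  | cons x xs ih =>
    intro a
    simp only [List.length_cons, List.range_succ_eq_map, List.foldl_cons, List.foldl_map,
      List.getD_cons_zero]
    have : ((List.range xs.length).foldl
        (fun acc i => acc ++ f ((x :: xs).getD (i + 1) ' ')) (a ++ f x))
        = (List.range xs.length).foldl (fun acc i => acc ++ f (xs.getD i ' ')) (a ++ f x) := by
      apply PySem.List.foldl_congr_mem
      intro acc i _; simp [List.getD_cons_succ]
    rw [this, ih]
    simp

-- A's loop computes: space after every non-' '/non-'\n' char except at the last index
theorem main_eq (cs : List Char) :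
    (List.range cs.length).foldl (fun acc i =>
      let c := cs.getD i ' '
      if c ≠ ' ' ∧ c ≠ '\n' ∧ i ≠ cs.length - 1 then acc ++ [c, ' '] else acc ++ [c]) []
    = cs.dropLast.flatMap (fun c => if c ≠ ' ' ∧ c ≠ '\n' then [c, ' '] else [c])
        ++ cs.drop (cs.length - 1) := by
  induction cs using List.reverseRecOn with
  | nil => simp
  | append_singleton xs x _ =>
    rw [show (xs ++ [x]).length = xs.length + 1 from by simp, List.range_succ,
      List.foldl_append, List.foldl_cons, List.foldl_nil]
    have hcongr :
        (List.range xs.length).foldl (fun acc i =>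
          let c := (xs ++ [x]).getD i ' '
          if c ≠ ' ' ∧ c ≠ '\n' ∧ i ≠ xs.length + 1 - 1 then acc ++ [c, ' '] else acc ++ [c]) []
        = (List.range xs.length).foldl (fun acc i =>
            acc ++ (if xs.getD i ' ' ≠ ' ' ∧ xs.getD i ' ' ≠ '\n'
                    then [xs.getD i ' ', ' '] else [xs.getD i ' '])) [] := by
      apply PySem.List.foldl_congr_mem
      intro acc i hi
      have hlt : i < xs.length := List.mem_range.mp hi
      have hgd : (xs ++ [x]).getD i ' ' = xs.getD i ' ' := by
        simp [List.getD, List.getElem?_append_left hlt]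
      have hne : i ≠ xs.length + 1 - 1 := by omega
      simp only [hgd, hne]
      split_ifs with h1 h2 h3 <;> simp_all
    rw [hcongr, idxfold (fun c => if c ≠ ' ' ∧ c ≠ '\n' then [c, ' '] else [c]) xs []]
    have hgd2 : (xs ++ [x]).getD xs.length ' ' = x := by
      simp [List.getD]
    simp [hgd2]


-- ===== VERDICT (by name: the statement is the Claim_ definition above) =====
theorem split_sen_spec : Claim_equal_split_sen := by
  intro s hdom
  have hnul : ∀ c ∈ s.toList, c ≠ '\x00' := by
    intro c hc hceq
    have h := List.all_eq_true.mp hdom c hc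
    subst hceq
    exact absurd h (by decide)
  unfold Spec_split_sen split_sen split_sen_alt
  simp only []
  rw [main_eq, final_assembly s hnul]
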